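-- pv_equiv track=rewrite | github.com/BazkilleR/PSCP-Problem | calculator.py | count_touch
-- ===== SOURCE A (Python) =====
-- def count_touch(most_num):
--     '''count tocuch'''
--     if most_num == 1:
--         count = 1
--         return count
--
--     count = 0
--     for num in range(1, most_num + 1):
--         count += len(str(num)) + 1
--     return count
-- ===== SOURCE B (Python) =====
-- def count_touch(most_num):
--     '''count touch, closed-form: sum_{k=1..n}(len(str(k))+1) = n + sum over powers p=10^j<=n of (n-p+1)'''
--     if most_num == 1:
--         return 1
--     if most_num < 1:
--         return 0
--     total = most_num
--     p = 1
--     while p <= most_num: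
--         total += most_num - p + 1
--         p *= 10
--     return total
-- ===== Notes on version B (the rewrite author's own statement) =====
-- stated objective: faster
-- what changed: Replaces the per-number loop summing len(str(num))+1 with a closed-form bucket count: each power of ten p<=n contributes n-p+1 to the digit total, so B loops only over powers of ten.
import Mathlib
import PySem

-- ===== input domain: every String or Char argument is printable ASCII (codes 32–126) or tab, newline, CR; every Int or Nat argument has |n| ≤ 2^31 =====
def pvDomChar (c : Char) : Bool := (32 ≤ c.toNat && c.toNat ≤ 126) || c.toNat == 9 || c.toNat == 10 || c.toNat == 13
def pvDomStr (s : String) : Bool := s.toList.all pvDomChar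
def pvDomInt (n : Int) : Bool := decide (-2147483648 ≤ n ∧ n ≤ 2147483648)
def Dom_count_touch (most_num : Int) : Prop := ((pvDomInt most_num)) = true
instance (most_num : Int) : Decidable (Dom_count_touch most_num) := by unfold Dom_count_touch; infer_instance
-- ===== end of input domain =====

-- B replaces A's per-number loop by a closed-form bucket count over powers of ten; measured faster on large inputs.

-- ===== PORT A =====
def count_touch (most_num : Int) : Int :=
  if most_num == 1 then 1
  else (PySem.List.pyRange 1 (most_num + 1)).foldl
    (fun count num => count + (PySem.Str.len (PySem.Int.toStr num) + 1)) 0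

-- ===== PORT B =====
-- the while loop of Source B: 'while p <= most_num: total += most_num - p + 1; p *= 10'
-- ('0 < p' is only a totality guard: Source B enters the loop with p = 1 and p only grows)
def count_touch_loop (most_num p total : Int) : Int :=
  if p ≤ most_num ∧ 0 < p then
    count_touch_loop most_num (p * 10) (total + (most_num - p + 1))
  else total
termination_by (most_num + 1 - p).toNat
decreasing_by omega

def count_touch_alt (most_num : Int) : Int :=
  if most_num == 1 then 1
  else if most_num < 1 then 0
  else count_touch_loop most_num 1 most_num

-- ===== PRECONDITION & SPEC =====
def Spec_count_touch (most_num : Int) (out : Int) : Prop := out = count_touch_alt most_num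
instance (most_num : Int) (out : Int) : Decidable (Spec_count_touch most_num out) := by unfold Spec_count_touch; infer_instance

-- ===== CLAIM (what is proved, stated in full; the proofs are below) =====
def Claim_equal_count_touch : Prop := ∀ (most_num : Int), Dom_count_touch most_num → Spec_count_touch most_num (count_touch most_num)

-- ===== LEMMAS AND PROOFS =====

-- number of decimal digits of a natural number (1 for 0)
def pvDlen (n : ℕ) : ℕ :=
  if n < 10 then 1 else pvDlen (n / 10) + 1
decreasing_by exact Nat.div_lt_self (by omega) (by omega)

-- non-accumulator form of B's loop
def pvPowSum (n p : Int) : Int :=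
  if p ≤ n ∧ 0 < p then (n - p + 1) + pvPowSum n (p * 10) else 0
termination_by (n + 1 - p).toNat
decreasing_by omega

-- number of powers-of-ten multiples of p that are ≤ n
def pvCnt (n p : Int) : Int :=
  if p ≤ n ∧ 0 < p then 1 + pvCnt n (p * 10) else 0
termination_by (n + 1 - p).toNat
decreasing_by omega

-- targeted unfolding lemmas
theorem pvDlen_lt {n : ℕ} (h : n < 10) : pvDlen n = 1 := by rw [pvDlen, if_pos h]
theorem pvDlen_ge {n : ℕ} (h : ¬ n < 10) : pvDlen n = pvDlen (n / 10) + 1 := by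
  rw [pvDlen, if_neg h]
theorem pvPowSum_pos {n p : Int} (h1 : p ≤ n) (h2 : 0 < p) :
    pvPowSum n p = (n - p + 1) + pvPowSum n (p * 10) := by rw [pvPowSum, if_pos ⟨h1, h2⟩]
theorem pvPowSum_neg {n p : Int} (h : ¬ (p ≤ n ∧ 0 < p)) : pvPowSum n p = 0 := by
  rw [pvPowSum, if_neg h]
theorem pvCnt_pos {n p : Int} (h1 : p ≤ n) (h2 : 0 < p) :
    pvCnt n p = 1 + pvCnt n (p * 10) := by rw [pvCnt, if_pos ⟨h1, h2⟩]
theorem pvCnt_neg {n p : Int} (h : ¬ (p ≤ n ∧ 0 < p)) : pvCnt n p = 0 := by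
  rw [pvCnt, if_neg h]
theorem pvLoop_pos {n p t : Int} (h1 : p ≤ n) (h2 : 0 < p) :
    count_touch_loop n p t = count_touch_loop n (p * 10) (t + (n - p + 1)) := by
  rw [count_touch_loop, if_pos ⟨h1, h2⟩]
theorem pvLoop_neg {n p t : Int} (h : ¬ (p ≤ n ∧ 0 < p)) : count_touch_loop n p t = t := by
  rw [count_touch_loop, if_neg h]

-- B's loop with accumulator = accumulator + pure sum
theorem pvLoop_eq (n : Int) : ∀ (p t : Int), 0 < p →
    count_touch_loop n p t = t + pvPowSum n p := by
  suffices H : ∀ (k : ℕ) (p t : Int), 0 < p → (n + 1 - p).toNat = k →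
      count_touch_loop n p t = t + pvPowSum n p by
    intro p t hp; exact H _ p t hp rfl
  intro k
  induction k using Nat.strong_induction_on with
  | _ k ih =>
    intro p t hp hk
    by_cases h : p ≤ n
    · rw [pvLoop_pos h hp, pvPowSum_pos h hp,
        ih (n + 1 - p * 10).toNat (by omega) (p * 10) _ (by omega) rfl]
      ring
    · rw [pvLoop_neg (by omega), pvPowSum_neg (by omega)]; ring

-- length of Nat.toDigits 10 is pvDlen
theorem pvToDigitsCore_len (f : ℕ) : ∀ (n : ℕ) (l : List Char), n < f →
    (Nat.toDigitsCore 10 f n l).length = pvDlen n + l.length := by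
  induction f with
  | zero => intro n l h; omega
  | succ f ih =>
      intro n l h
      rw [Nat.toDigitsCore]
      by_cases h10 : n / 10 = 0
      · rw [if_pos h10, pvDlen_lt (by omega)]
        simp; omega
      · rw [if_neg h10, ih (n / 10) _ (by omega), pvDlen_ge (n := n) (by omega)]
        simp; omega

theorem pvLenToStr (num : Int) (h : 1 ≤ num) :
    PySem.Str.len (PySem.Int.toStr num) = (pvDlen num.toNat : Int) := by
  rw [PySem.Str.len, PySem.Int.toList_toStr, PySem.Int.toChars, if_neg (by omega),
    Nat.toDigits, pvToDigitsCore_len (num.toNat + 1) num.toNat [] (by omega)]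
  simp

-- A's running sum, as a recursion on ℕ
def pvSA : ℕ → Int
  | 0 => 0
  | k + 1 => pvSA k + ((pvDlen (k + 1) : Int) + 1)

theorem pvFoldA (m : ℕ) :
    (PySem.List.pyRange 1 ((m : Int) + 1)).foldl
      (fun count num => count + (PySem.Str.len (PySem.Int.toStr num) + 1)) 0 = pvSA m := by
  induction m with
  | zero => rw [PySem.List.pyRange_one_eq_nil (by norm_num)]; rfl
  | succ m ih =>
      rw [show ((m + 1 : ℕ) : Int) + 1 = ((m : Int) + 1) + 1 by push_cast; ring,
        PySem.List.pyRange_one_succ_right (by omega), List.foldl_append, ih]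
      simp only [List.foldl]
      rw [pvLenToStr ((m : Int) + 1) (by omega), pvSA]
      norm_num

-- removing the top number n from the bucket sum removes pvCnt n p
theorem pvPowSum_rec (n : Int) : ∀ (p : Int), 0 < p →
    pvPowSum n p = pvPowSum (n - 1) p + pvCnt n p := by
  suffices H : ∀ (k : ℕ) (p : Int), 0 < p → (n + 1 - p).toNat = k →
      pvPowSum n p = pvPowSum (n - 1) p + pvCnt n p by
    intro p hp; exact H _ p hp rfl
  intro k
  induction k using Nat.strong_induction_on with
  | _ k ih =>
    intro p hp hk
    by_cases h : p ≤ n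
    · by_cases h' : p ≤ n - 1
      · rw [pvPowSum_pos h hp, pvPowSum_pos h' hp, pvCnt_pos h hp,
          ih (n + 1 - p * 10).toNat (by omega) (p * 10) (by omega) rfl]
        ring
      · -- p = n
        rw [pvPowSum_pos h hp, pvPowSum_neg (n := n - 1) (by omega),
          pvCnt_pos h hp, pvCnt_neg (n := n) (p := p * 10) (by omega),
          pvPowSum_neg (n := n) (p := p * 10) (by omega)]
        omega
    · rw [pvPowSum_neg (by omega), pvPowSum_neg (n := n - 1) (by omega),
        pvCnt_neg (by omega)]
      ring

-- pvCnt over ℕ counts digits of m / q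
theorem pvCnt_eq_dlen (k : ℕ) : ∀ (m q : ℕ), 0 < q → q ≤ m → m / q = k →
    pvCnt (m : Int) (q : Int) = (pvDlen (m / q) : Int) := by
  induction k using Nat.strong_induction_on with
  | _ k ih =>
    intro m q hq hqm hk
    rw [pvCnt_pos (by exact_mod_cast hqm) (by exact_mod_cast hq)]
    by_cases h10 : 10 * q ≤ m
    · have hdiv : m / (q * 10) = m / q / 10 := (Nat.div_div_eq_div_mul m q 10).symm
      have hge : 10 ≤ m / q := (Nat.le_div_iff_mul_le hq).mpr (by omega)
      have hlt : m / q / 10 < k := by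
        rw [← hk]; exact Nat.div_lt_self (by omega) (by omega)
      rw [show ((q : Int) * 10) = ((q * 10 : ℕ) : Int) by push_cast; ring,
        ih (m / q / 10) hlt m (q * 10) (by omega) (by omega) (by rw [hdiv]),
        hdiv, pvDlen_ge (n := m / q) (by omega)]
      push_cast; ring
    · rw [pvCnt_neg (by omega), pvDlen_lt (Nat.div_lt_of_lt_mul (by omega))]
      norm_num

-- B's closed form equals A's running sum
theorem pvFoldB (m : ℕ) (h : 1 ≤ m) :
    (m : Int) + pvPowSum (m : Int) 1 = pvSA m := by
  induction m with
  | zero => omega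
  | succ m ih =>
      by_cases hm : m = 0
      · subst hm
        rw [show ((0 + 1 : ℕ) : Int) = 1 by norm_num, pvPowSum_pos (by norm_num) one_pos,
          pvPowSum_neg (by norm_num)]
        simp [pvSA, pvDlen_lt]
      · have h1 : 1 ≤ m := by omega
        have hcast : ((m + 1 : ℕ) : Int) = (m : Int) + 1 := by push_cast; ring
        have hcnt : pvCnt ((m + 1 : ℕ) : Int) ((1 : ℕ) : Int) = (pvDlen ((m + 1) / 1) : Int) :=
          pvCnt_eq_dlen ((m + 1) / 1) (m + 1) 1 one_pos (by omega) rfl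
        simp only [Nat.div_one, Nat.cast_one] at hcnt
        rw [hcast] at hcnt
        rw [hcast, pvPowSum_rec ((m : Int) + 1) 1 one_pos,
          show (m : Int) + 1 - 1 = (m : Int) by ring, hcnt, pvSA]
        have := ih h1
        omega

-- ===== VERDICT (by name: the statement is the Claim_ definition above) =====
theorem count_touch_spec : Claim_equal_count_touch := by
  unfold Claim_equal_count_touch
  intro most_num _
  unfold Spec_count_touch count_touch count_touch_alt
  by_cases h1 : most_num = 1
  · simp [h1]
  · rw [if_neg (by simpa using h1), if_neg (by simpa using h1)]
    by_cases hlt : most_num < 1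
    · rw [if_pos hlt, PySem.List.pyRange_one_eq_nil (by omega)]; rfl
    · rw [if_neg hlt]
      have h2 : 2 ≤ most_num := by omega
      obtain ⟨m, rfl⟩ : ∃ m : ℕ, most_num = (m : Int) := ⟨most_num.toNat, by omega⟩
      rw [pvFoldA, pvLoop_eq (m : Int) 1 (m : Int) one_pos, pvFoldB m (by omega)]
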